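-- pv_equiv track=rewrite | github.com/hardtekpt/arctis_centre | examples/live_state_dashboard.py | compute_app_movements
-- ===== SOURCE A (Python) =====
-- def compute_app_movements(old_routed: dict[str, list[str]], new_routed: dict[str, list[str]]) -> list[str]:
--     channels = ("master", "game", "chatRender", "media", "aux", "chatCapture")
--     old_map: dict[str, set[str]] = {}
--     new_map: dict[str, set[str]] = {}
--
--     for channel in channels:
--         for app in old_routed.get(channel, []):
--             old_map.setdefault(app, set()).add(channel)
--         for app in new_routed.get(channel, []):
--             new_map.setdefault(app, set()).add(channel)
--
--     moves: list[str] = []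
--     for app in sorted(set(old_map.keys()) | set(new_map.keys())):
--         old_channels = old_map.get(app, set())
--         new_channels = new_map.get(app, set())
--         if old_channels != new_channels:
--             old_label = ",".join(sorted(old_channels)) if old_channels else "-"
--             new_label = ",".join(sorted(new_channels)) if new_channels else "-"
--             moves.append(f"{app}: {old_label} -> {new_label}")
--     return moves
-- ===== SOURCE B (Python) =====
-- def compute_app_movements(old_routed: dict[str, list[str]], new_routed: dict[str, list[str]]) -> list[str]:
--     channels = ("master", "game", "chatRender", "media", "aux", "chatCapture")
--     apps: set[str] = set()
--     for routed in (old_routed, new_routed):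
--         for channel in channels:
--             apps.update(routed.get(channel, []))
--     moves: list[str] = []
--     for app in sorted(apps):
--         old_channels = {c for c in channels if app in old_routed.get(c, [])}
--         new_channels = {c for c in channels if app in new_routed.get(c, [])}
--         if old_channels != new_channels:
--             old_label = ",".join(sorted(old_channels)) if old_channels else "-"
--             new_label = ",".join(sorted(new_channels)) if new_channels else "-"
--             moves.append(f"{app}: {old_label} -> {new_label}")
--     return moves
-- ===== Notes on version B (the rewrite author's own statement) =====
-- stated objective: alternative
-- what changed: Drops A's two inverted app->channels index dicts: B collects the app universe in one set and then, per app, recomputes its old/new channel sets by direct membership tests against the routing dicts.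
import Mathlib
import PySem

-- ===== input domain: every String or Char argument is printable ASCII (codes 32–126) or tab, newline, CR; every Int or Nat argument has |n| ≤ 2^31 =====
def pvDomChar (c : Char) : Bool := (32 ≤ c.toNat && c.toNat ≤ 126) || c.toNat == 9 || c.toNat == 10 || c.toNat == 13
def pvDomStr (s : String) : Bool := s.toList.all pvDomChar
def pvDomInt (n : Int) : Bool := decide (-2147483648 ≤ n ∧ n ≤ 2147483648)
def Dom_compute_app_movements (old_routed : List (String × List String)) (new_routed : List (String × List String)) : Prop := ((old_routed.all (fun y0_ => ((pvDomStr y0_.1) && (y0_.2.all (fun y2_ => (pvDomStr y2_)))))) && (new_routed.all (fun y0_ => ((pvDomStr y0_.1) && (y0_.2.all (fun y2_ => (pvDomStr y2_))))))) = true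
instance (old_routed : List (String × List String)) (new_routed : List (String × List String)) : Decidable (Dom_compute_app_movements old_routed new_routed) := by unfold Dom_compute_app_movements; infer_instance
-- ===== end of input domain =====

-- B replaces A's two inverted app->channels index dicts by per-app membership recomputation
-- over the six channels ('alternative': structurally different, similar cost at this fixed channel count).

-- the fixed channel tuple both programs iterate
def pvChannels : List String := ["master", "game", "chatRender", "media", "aux", "chatCapture"]

-- ===== PORT A =====
def compute_app_movements (old_routed : List (String × List String)) (new_routed : List (String × List String)) : List String :=
  -- for channel in channels: fill old_map / new_map (setdefault(app, set()).add(channel) = modify with default ∅)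
  let maps := pvChannels.foldl
    (fun (st : PySem.Dict String (PySem.Set String) × PySem.Dict String (PySem.Set String)) channel =>
      (((PySem.Dict.mk old_routed).getD channel []).foldl
          (fun m app => m.modify app PySem.Set.empty (fun s => PySem.Set.add s channel)) st.1,
       ((PySem.Dict.mk new_routed).getD channel []).foldl
          (fun m app => m.modify app PySem.Set.empty (fun s => PySem.Set.add s channel)) st.2))
    (PySem.Dict.empty, PySem.Dict.empty)
  let old_map := maps.1
  let new_map := maps.2
  -- for app in sorted(set(old_map.keys()) | set(new_map.keys())):
  let apps := PySem.List.sorted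
    (PySem.Set.union (PySem.Set.ofList old_map.keys) new_map.keys) (fun x => x) false
  apps.foldl (fun moves app =>
    let old_channels := old_map.getD app PySem.Set.empty
    let new_channels := new_map.getD app PySem.Set.empty
    if PySem.Set.equal old_channels new_channels then moves
    else
      let old_label := if old_channels.isEmpty then "-"
        else PySem.Str.join "," (PySem.List.sorted old_channels (fun x => x) false)
      let new_label := if new_channels.isEmpty then "-"
        else PySem.Str.join "," (PySem.List.sorted new_channels (fun x => x) false)
      moves ++ [app ++ ": " ++ old_label ++ " -> " ++ new_label]) []

-- ===== PORT B =====
def compute_app_movements_alt (old_routed : List (String × List String)) (new_routed : List (String × List String)) : List String :=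
  -- apps.update(routed.get(channel, [])) over both dicts and all channels
  let apps := [old_routed, new_routed].foldl
    (fun s routed => pvChannels.foldl
      (fun s channel => PySem.Set.update s ((PySem.Dict.mk routed).getD channel [])) s)
    PySem.Set.empty
  (PySem.List.sorted apps (fun x => x) false).foldl (fun moves app =>
    -- {c for c in channels if app in routed.get(c, [])}
    let old_channels := PySem.Set.ofList
      (pvChannels.filter (fun c => ((PySem.Dict.mk old_routed).getD c []).contains app))
    let new_channels := PySem.Set.ofList
      (pvChannels.filter (fun c => ((PySem.Dict.mk new_routed).getD c []).contains app))
    if PySem.Set.equal old_channels new_channels then moves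
    else
      let old_label := if old_channels.isEmpty then "-"
        else PySem.Str.join "," (PySem.List.sorted old_channels (fun x => x) false)
      let new_label := if new_channels.isEmpty then "-"
        else PySem.Str.join "," (PySem.List.sorted new_channels (fun x => x) false)
      moves ++ [app ++ ": " ++ old_label ++ " -> " ++ new_label]) []

-- ===== PRECONDITION & SPEC =====
def Spec_compute_app_movements (old_routed : List (String × List String)) (new_routed : List (String × List String)) (out : List String) : Prop := out = compute_app_movements_alt old_routed new_routed
instance (old_routed : List (String × List String)) (new_routed : List (String × List String)) (out : List String) : Decidable (Spec_compute_app_movements old_routed new_routed out) := by unfold Spec_compute_app_movements; infer_instance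

-- ===== CLAIM (what is proved, stated in full; the proofs are below) =====
def Claim_equal_compute_app_movements : Prop := ∀ (old_routed : List (String × List String)) (new_routed : List (String × List String)), Dom_compute_app_movements old_routed new_routed → Spec_compute_app_movements old_routed new_routed (compute_app_movements old_routed new_routed)

-- ===== LEMMAS AND PROOFS =====

theorem pvSet_update_ofList (s l : List String) :
    PySem.Set.update s (PySem.Set.ofList l) = PySem.Set.update s l := by
  rw [PySem.Set.update_eq_append_filter, PySem.Set.update_eq_append_filter]
  simp only [PySem.Set.ofList_eq_self_of_nodup _ (PySem.Set.nodup_ofList l)]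

-- one channel's inner loop: getD after repeating 'modify app ∅ (add · ch)' over l
theorem pvInner_getD (l : List String) (ch app : String)
    (m : PySem.Dict String (PySem.Set String)) :
    (l.foldl (fun m a => m.modify a PySem.Set.empty (fun s => PySem.Set.add s ch)) m).getD app PySem.Set.empty
      = if l.contains app then PySem.Set.add (m.getD app PySem.Set.empty) ch
        else m.getD app PySem.Set.empty := by
  induction l generalizing m with
  | nil => simp
  | cons a t ih =>
    simp only [List.foldl_cons, ih, List.contains_cons]
    by_cases hax : a = app
    · subst hax
      simp [PySem.Dict.getD_modify_self]
    · have hne : ¬ app = a := fun h => hax h.symm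
      simp [hne, PySem.Dict.getD_modify_of_ne _ _ _ (Ne.symm hax)]

-- the whole channel loop for one routing dict: getD app = fold of conditional add
theorem pvBuild_getD (chs : List String) (routed : List (String × List String))
    (m : PySem.Dict String (PySem.Set String)) (app : String) :
    (chs.foldl (fun m channel =>
        ((PySem.Dict.mk routed).getD channel []).foldl
          (fun m a => m.modify a PySem.Set.empty (fun s => PySem.Set.add s channel)) m) m).getD app PySem.Set.empty
      = (chs.filter (fun c => ((PySem.Dict.mk routed).getD c []).contains app)).foldl
          (fun s c => PySem.Set.add s c) (m.getD app PySem.Set.empty) := by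
  induction chs generalizing m with
  | nil => simp
  | cons c t ih =>
    simp only [List.foldl_cons, ih, List.filter_cons, pvInner_getD]
    by_cases hc : app ∈ (PySem.Dict.mk routed).getD c []
    · simp [hc]
    · simp [hc]

-- keys of the channel loop for one routing dict
theorem pvBuild_keys (chs : List String) (routed : List (String × List String))
    (m : PySem.Dict String (PySem.Set String)) :
    (chs.foldl (fun m channel =>
        ((PySem.Dict.mk routed).getD channel []).foldl
          (fun m a => m.modify a PySem.Set.empty (fun s => PySem.Set.add s channel)) m) m).keys
      = PySem.Set.update m.keys (chs.flatMap (fun c => (PySem.Dict.mk routed).getD c [])) := by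
  induction chs generalizing m with
  | nil => simp
  | cons c t ih =>
    simp only [List.foldl_cons, ih, List.flatMap_cons, PySem.Set.update_append]
    rw [PySem.Dict.keys_foldl_modify]

-- B's app-gathering loop over one routing dict
theorem pvGather (chs : List String) (routed : List (String × List String)) (s : List String) :
    chs.foldl (fun s channel => PySem.Set.update s ((PySem.Dict.mk routed).getD channel [])) s
      = PySem.Set.update s (chs.flatMap (fun c => (PySem.Dict.mk routed).getD c [])) := by
  induction chs generalizing s with
  | nil => simp
  | cons c t ih => simp [List.foldl_cons, ih, PySem.Set.update_append]

-- ===== VERDICT (by name: the statement is the Claim_ definition above) =====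
theorem compute_app_movements_spec : Claim_equal_compute_app_movements := by
  intro old_routed new_routed _
  unfold Spec_compute_app_movements compute_app_movements compute_app_movements_alt
  rw [PySem.List.foldl_prod_mk
    (fun m channel => ((PySem.Dict.mk old_routed).getD channel []).foldl
      (fun m app => m.modify app PySem.Set.empty (fun s => PySem.Set.add s channel)) m)
    (fun m channel => ((PySem.Dict.mk new_routed).getD channel []).foldl
      (fun m app => m.modify app PySem.Set.empty (fun s => PySem.Set.add s channel)) m)
    pvChannels PySem.Dict.empty PySem.Dict.empty]
  simp only [List.foldl_cons, List.foldl_nil]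
  rw [pvGather, pvGather, pvBuild_keys, pvBuild_keys]
  set oldFlat := pvChannels.flatMap (fun c => (PySem.Dict.mk old_routed).getD c []) with hof
  set newFlat := pvChannels.flatMap (fun c => (PySem.Dict.mk new_routed).getD c []) with hnf
  have hkeys :
      PySem.Set.union
        (PySem.Set.ofList (PySem.Set.update (PySem.Dict.empty (κ := String) (ν := PySem.Set String)).keys oldFlat))
        (PySem.Set.update (PySem.Dict.empty (κ := String) (ν := PySem.Set String)).keys newFlat)
      = PySem.Set.update (PySem.Set.update PySem.Set.empty oldFlat) newFlat := by
    rw [PySem.Dict.keys_empty]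
    rw [PySem.Set.update_nil_left, PySem.Set.update_nil_left,
      PySem.Set.ofList_eq_self_of_nodup _ (PySem.Set.nodup_ofList oldFlat),
      PySem.Set.union_eq_update, pvSet_update_ofList]
    rfl
  rw [hkeys]
  congr 1
  funext moves app
  rw [pvBuild_getD, pvBuild_getD]
  simp only [PySem.Dict.getD_empty, PySem.Set.empty]
  rw [← PySem.Set.ofList_eq_foldl, ← PySem.Set.ofList_eq_foldl]
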